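-- pv_equiv track=rewrite | github.com/cormac-doyle/AdventOfCode | 2024/day9/p2.py | find_space_in_disk
-- ===== SOURCE A (Python) =====
-- def find_space_in_disk(int_list, min_space, max_end):
--
--     curr_count = 0
--     start_idx = -1
--     for i in range(max_end):
--         if int_list[i] == -1:
--             if curr_count==0:
--                 start_idx=i
--             curr_count+=1
--             if curr_count == min_space:
--                 return start_idx
--         else:
--             curr_count=0
--             start_idx = -1
--
--     return None
-- ===== SOURCE B (Python) =====
-- def find_space_in_disk(int_list, min_space, max_end):
--     prefix = int_list[:max(max_end, 0)]
--     idx = 0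
--     while idx < len(prefix):
--         j = idx
--         while j < len(prefix) and prefix[j] == prefix[idx]:
--             j += 1
--         if prefix[idx] == -1 and 1 <= min_space <= j - idx:
--             return idx
--         idx = j
--     return None
-- ===== Notes on version B (the rewrite author's own statement) =====
-- stated objective: alternative
-- what changed: B slices the scanned prefix once and walks it run-by-run with a two-pointer maximal-run scan (returning the start of the first maximal run of -1 whose length is >= min_space), instead of A's per-cell counter that resets on every non-free cell.
-- outside the precondition, e.g. on find_space_in_disk([-1, -1], 2, 3): A returns 0, B returns 0
import Mathlib
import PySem

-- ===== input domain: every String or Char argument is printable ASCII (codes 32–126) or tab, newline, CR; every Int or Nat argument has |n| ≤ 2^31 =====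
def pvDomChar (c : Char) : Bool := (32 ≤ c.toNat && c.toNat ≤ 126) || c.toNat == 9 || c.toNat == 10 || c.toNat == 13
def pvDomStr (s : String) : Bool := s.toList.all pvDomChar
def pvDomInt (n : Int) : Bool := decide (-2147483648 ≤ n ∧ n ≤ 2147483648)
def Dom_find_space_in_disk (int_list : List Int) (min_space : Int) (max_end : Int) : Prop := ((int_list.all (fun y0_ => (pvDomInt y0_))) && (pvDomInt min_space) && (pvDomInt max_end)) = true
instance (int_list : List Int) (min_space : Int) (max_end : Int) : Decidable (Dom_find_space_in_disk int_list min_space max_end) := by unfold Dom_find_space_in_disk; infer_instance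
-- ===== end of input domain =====

-- B replaces A's per-cell counter scan by a one-shot prefix slice walked run-by-run
-- with a two-pointer maximal-run scan (objective: alternative decomposition, same cost).

-- ===== PORT A =====
-- the for-loop of A: index i over range(max_end), fuel = remaining iterations,
-- state (curr_count, start_idx)
def goA (l : List Int) (ms : Int) : Nat → Nat → Int → Int → Option Int
  | 0, _, _, _ => none
  | fuel+1, i, cnt, start =>
    match PySem.List.pyGet? l (i : Int) with
    | none => none   -- IndexError; excluded by Pre_
    | some v =>
      if v = -1 then
        let start' := if cnt = 0 then (i : Int) else start
        if cnt + 1 = ms then some start'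
        else goA l ms fuel (i+1) (cnt+1) start'
      else goA l ms fuel (i+1) 0 (-1)

def find_space_in_disk (int_list : List Int) (min_space : Int) (max_end : Int) : Option Int :=
  goA int_list min_space max_end.toNat 0 0 (-1)

-- ===== PORT B =====
-- inner while of B: advance j while j < len(prefix) and prefix[j] equals the run's
-- value v; fuel = len(prefix) - j, so fuel 0 is exactly the bound check
def runEnd (p : List Int) (v : Int) : Nat → Nat → Nat
  | 0, j => j
  | fuel+1, j => if p.getD j 0 = v then runEnd p v fuel (j+1) else j

-- outer while of B over the sliced prefix; one fuel unit per iteration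
def goB (p : List Int) (ms : Int) : Nat → Nat → Option Int
  | 0, _ => none
  | fuel+1, idx =>
    if idx < p.length then
      let j := runEnd p (p.getD idx 0) (p.length - idx) idx
      if p.getD idx 0 = -1 ∧ 1 ≤ ms ∧ ms ≤ (j : Int) - (idx : Int) then some (idx : Int)
      else goB p ms fuel j
    else none

def find_space_in_disk_alt (int_list : List Int) (min_space : Int) (max_end : Int) : Option Int :=
  let p := PySem.List.slice int_list none (some (max max_end 0))
  goB p min_space (p.length + 1) 0

-- ===== PRECONDITION & SPEC =====
-- Pre_ excludes max_end > len(int_list): there A raises IndexError unless a window of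
-- min_space consecutive -1 cells completes inside the list, while B clamps to the list end.
def Pre_find_space_in_disk (int_list : List Int) (min_space : Int) (max_end : Int) : Prop :=
  max_end ≤ (int_list.length : Int)
instance (int_list : List Int) (min_space : Int) (max_end : Int) : Decidable (Pre_find_space_in_disk int_list min_space max_end) := by unfold Pre_find_space_in_disk; infer_instance

def pvWitness_find_space_in_disk : List Int × Int × Int := ([-1, 0, -1, -1], 2, 4)

def Spec_find_space_in_disk (int_list : List Int) (min_space : Int) (max_end : Int) (out : Option Int) : Prop := out = find_space_in_disk_alt int_list min_space max_end
instance (int_list : List Int) (min_space : Int) (max_end : Int) (out : Option Int) : Decidable (Spec_find_space_in_disk int_list min_space max_end out) := by unfold Spec_find_space_in_disk; infer_instance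

-- ===== CLAIM (what is proved, stated in full; the proofs are below) =====
def Claim_equal_find_space_in_disk : Prop := ∀ (int_list : List Int) (min_space : Int) (max_end : Int), Dom_find_space_in_disk int_list min_space max_end → Pre_find_space_in_disk int_list min_space max_end → Spec_find_space_in_disk int_list min_space max_end (find_space_in_disk int_list min_space max_end)

-- ===== LEMMAS AND PROOFS =====

theorem runEnd_ge (p : List Int) (v : Int) :
    ∀ f j, j ≤ runEnd p v f j := by
  intro f
  induction f with
  | zero => intro j; simp [runEnd]
  | succ f ih =>
    intro j
    rw [runEnd]
    split
    · exact le_trans (by omega) (ih (j+1))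
    · omega

theorem runEnd_le (p : List Int) (v : Int) :
    ∀ f j, runEnd p v f j ≤ f + j := by
  intro f
  induction f with
  | zero => intro j; simp [runEnd]
  | succ f ih =>
    intro j
    rw [runEnd]
    split
    · have := ih (j+1); omega
    · omega

theorem runEnd_all (p : List Int) (v : Int) :
    ∀ f j k, j ≤ k → k < runEnd p v f j → p.getD k 0 = v := by
  intro f
  induction f with
  | zero => intro j k hk hk'; simp [runEnd] at hk'; omega
  | succ f ih =>
    intro j k hk hk'
    rw [runEnd] at hk'
    by_cases hv : p.getD j 0 = v
    · rw [if_pos hv] at hk'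
      rcases Nat.eq_or_lt_of_le hk with rfl | hlt
      · exact hv
      · exact ih (j+1) k hlt hk'
    · rw [if_neg hv] at hk'; omega

theorem runEnd_stop (p : List Int) (v : Int) :
    ∀ f j, f + j = p.length →
      p.length ≤ runEnd p v f j ∨ p.getD (runEnd p v f j) 0 ≠ v := by
  intro f
  induction f with
  | zero => intro j hj; left; simp [runEnd]; omega
  | succ f ih =>
    intro j hj
    rw [runEnd]
    by_cases hv : p.getD j 0 = v
    · rw [if_pos hv]; exact ih (j+1) (by omega)
    · rw [if_neg hv]; exact Or.inr hv

theorem runEnd_lt_self (p : List Int) (idx : Nat) (h : idx < p.length) :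
    idx < runEnd p (p.getD idx 0) (p.length - idx) idx := by
  have hf : p.length - idx = (p.length - idx - 1) + 1 := by omega
  rw [hf, runEnd, if_pos rfl]
  exact lt_of_lt_of_le (Nat.lt_succ_self idx) (runEnd_ge p _ _ (idx+1))

-- A's loop reads only indices below meN: truncating the list does not change it
theorem goA_take (l : List Int) (ms : Int) (meN : Nat) (hme : meN ≤ l.length) :
    ∀ f i, f + i = meN → ∀ cnt start,
      goA l ms f i cnt start = goA (l.take meN) ms f i cnt start := by
  intro f
  induction f with
  | zero => intro i _ cnt start; rfl
  | succ f ih =>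
    intro i hfi cnt start
    have h1 : i < l.length := by omega
    have h2 : i < (l.take meN).length := by simp; omega
    rw [goA, goA]
    simp only [PySem.List.pyGet?_natCast,
      List.getElem?_eq_getElem h1, List.getElem?_eq_getElem h2, List.getElem_take]
    by_cases hv : l[i] = -1
    · simp only [hv, if_pos rfl]
      by_cases hc : cnt + 1 = ms
      · simp [hc]
      · simp only [if_neg hc]
        exact ih (i+1) (by omega) _ _
    · simp only [if_neg hv]
      exact ih (i+1) (by omega) _ _

-- skipping a stretch of non-free cells leaves A in the reset state
theorem goA_skip (p : List Int) (ms : Int) (i j : Nat) (hij : i ≤ j)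
    (hall : ∀ k, i ≤ k → k < j → p.getD k 0 ≠ -1) :
    goA p ms (p.length - i) i 0 (-1) = goA p ms (p.length - j) j 0 (-1) := by
  induction j with
  | zero =>
    have : i = 0 := by omega
    subst this; rfl
  | succ j ih => ?_
  rcases Nat.eq_or_lt_of_le hij with rfl | hlt
  · rfl
  · have hij' : i ≤ j := by omega
    rw [ih hij' (fun k hk hk' => hall k hk (by omega))]
    by_cases hj : j < p.length
    · have hf : p.length - j = (p.length - (j+1)) + 1 := by omega
      rw [hf]
      conv_lhs => rw [goA]
      have hpj : p[j] ≠ -1 := by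
        have := hall j hij' (by omega)
        rwa [List.getD_eq_getElem?_getD, List.getElem?_eq_getElem hj] at this
      simp only [PySem.List.pyGet?_natCast, List.getElem?_eq_getElem hj]
      simp [hpj]
    · have hf0 : p.length - j = 0 := by omega
      have hf1 : p.length - (j+1) = 0 := by omega
      rw [hf0, hf1]
      rfl

-- inside a run of free cells [s, j): A returns s iff the run is long enough
theorem goA_run (p : List Int) (ms : Int) (s j : Nat) (hj : j ≤ p.length)
    (hall : ∀ k, s ≤ k → k < j → p.getD k 0 = -1)
    (hstop : j = p.length ∨ p.getD j 0 ≠ -1) :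
    ∀ i, s ≤ i → i ≤ j → ∀ start : Int, (i ≠ s → start = (s : Int)) →
    ¬(1 ≤ ms ∧ ms ≤ (i : Int) - (s : Int)) →
    goA p ms (p.length - i) i ((i : Int) - (s : Int)) start =
      if 1 ≤ ms ∧ ms ≤ (j : Int) - (s : Int) then some (s : Int)
      else goA p ms (p.length - j) j 0 (-1) := by
  intro i
  induction hi : j - i generalizing i with
  | zero =>
    intro hsi hij start hstart hno
    have : i = j := by omega
    subst this
    rw [if_neg (by push_cast at hno ⊢; omega)]
    by_cases hjl : i < p.length
    · have hne : p[i] ≠ -1 := by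
        rcases hstop with h1 | h1
        · omega
        · rwa [List.getD_eq_getElem?_getD, List.getElem?_eq_getElem hjl] at h1
      have hf : p.length - i = (p.length - (i+1)) + 1 := by omega
      rw [hf]
      conv_lhs => rw [goA]
      conv_rhs => rw [goA]
      simp only [PySem.List.pyGet?_natCast, List.getElem?_eq_getElem hjl]
      simp [hne]
    · have hf0 : p.length - i = 0 := by omega
      rw [hf0]
      rfl
  | succ n ihn =>
    intro hsi hij start hstart hno
    have hlt : i < j := by omega
    have hil : i < p.length := by omega
    have hf : p.length - i = (p.length - (i+1)) + 1 := by omega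
    rw [hf]
    conv_lhs => rw [goA]
    have hv : p[i] = -1 := by
      have := hall i hsi hlt
      rwa [List.getD_eq_getElem?_getD, List.getElem?_eq_getElem hil] at this
    simp only [PySem.List.pyGet?_natCast, List.getElem?_eq_getElem hil, hv, if_pos rfl]
    have hstart' : (if ((i : Int) - (s : Int)) = 0 then (i : Int) else start) = (s : Int) := by
      by_cases his : i = s
      · subst his; simp
      · have hsl : s < i := by omega
        rw [if_neg (by omega), hstart his]
    rw [hstart']
    by_cases hc : (i : Int) - (s : Int) + 1 = ms
    · have hjlt : (i : Int) < (j : Int) := by exact_mod_cast hlt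
      have hcond : 1 ≤ ms ∧ ms ≤ (j : Int) - (s : Int) := by
        constructor <;> omega
      rw [if_pos hc, if_pos hcond]
      simp
    · rw [if_neg hc]
      have harith : (i : Int) - (s : Int) + 1 = ((i+1 : Nat) : Int) - (s : Int) := by
        push_cast; ring
      rw [harith]
      exact ihn (i+1) (by omega) (by omega) (by omega) (s : Int) (fun _ => rfl)
        (by push_cast at hno hc ⊢; omega)

-- main correspondence: A's counter scan from a reset state equals B's run scan
theorem goA_eq_goB (p : List Int) (ms : Int) :
    ∀ fB i, p.length - i < fB →
      goA p ms (p.length - i) i 0 (-1) = goB p ms fB i := by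
  intro fB
  induction fB with
  | zero => intro i h; omega
  | succ fB ih =>
    intro i hfB
    by_cases h : i < p.length
    · conv_rhs => rw [goB]
      rw [if_pos h]
      set j := runEnd p (p.getD i 0) (p.length - i) i with hjdef
      have hij : i < j := runEnd_lt_self p i h
      have hjle : j ≤ p.length := by
        have := runEnd_le p (p.getD i 0) (p.length - i) i; omega
      have hallrun : ∀ k, i ≤ k → k < j → p.getD k 0 = p.getD i 0 :=
        runEnd_all p (p.getD i 0) (p.length - i) i
      have hstop0 := runEnd_stop p (p.getD i 0) (p.length - i) i (by omega)
      by_cases hv : p.getD i 0 = -1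
      · -- free run
        have hstop : j = p.length ∨ p.getD j 0 ≠ -1 := by
          rcases hstop0 with h1 | h1
          · left; omega
          · right; rw [← hv]; exact h1
        have hrun := goA_run p ms i j hjle
          (fun k hk hk' => by rw [hallrun k hk hk', hv])
          hstop i (le_refl i) (by omega) (-1) (fun hne => absurd rfl hne)
          (by intro hx; omega)
        have h0 : ((i : Int) - (i : Int)) = 0 := by ring
        rw [h0] at hrun
        rw [hrun]
        by_cases hc : 1 ≤ ms ∧ ms ≤ (j : Int) - (i : Int)
        · rw [if_pos hc, if_pos ⟨hv, hc.1, hc.2⟩]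
        · rw [if_neg hc, if_neg (by intro hx; exact hc ⟨hx.2.1, hx.2.2⟩)]
          exact ih j (by omega)
      · -- non-free run
        rw [if_neg (by intro hx; exact hv hx.1)]
        rw [goA_skip p ms i j (by omega)
          (fun k hk hk' => by rw [hallrun k hk hk']; exact hv)]
        exact ih j (by omega)
    · have hf0 : p.length - i = 0 := by omega
      rw [hf0]
      conv_rhs => rw [goB]
      rw [if_neg h]
      rfl

-- the sliced prefix is take
theorem slice_prefix (l : List Int) (me : Int) :
    PySem.List.slice l none (some (max me 0)) = l.take me.toNat := by
  have : max me 0 = ((me.toNat : Nat) : Int) := by omega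
  rw [this, PySem.List.slice_to_natCast]

-- ===== VERDICT (by name: the statement is the Claim_ definition above) =====
theorem find_space_in_disk_spec : Claim_equal_find_space_in_disk := by
  intro l ms me _hdom hpre
  unfold Spec_find_space_in_disk find_space_in_disk find_space_in_disk_alt
  unfold Pre_find_space_in_disk at hpre
  rw [slice_prefix]
  have hle : me.toNat ≤ l.length := by omega
  have hlen : (l.take me.toNat).length = me.toNat := by simp; omega
  show goA l ms me.toNat 0 0 (-1) = goB (l.take me.toNat) ms ((l.take me.toNat).length + 1) 0
  rw [goA_take l ms me.toNat hle me.toNat 0 (by omega)]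
  have h := goA_eq_goB (l.take me.toNat) ms ((l.take me.toNat).length + 1) 0 (by omega)
  simp only [Nat.sub_zero] at h
  rw [← h, hlen]
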